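-- pv_equiv track=rewrite | github.com/Lilay4618/-Python | HomeWork_3_5.py | get_fib
-- ===== SOURCE A (Python) =====
-- def get_fib(x):
--     arr = []
--     a, b =  1, 1
--     for i in range (x):
--         arr.append(a)
--         a, b = b, a + b
--     a, b = 0, 1
--     for i in range (x+1):
--         arr.insert(0, a)
--         a, b = b, a - b
--     return arr
-- ===== SOURCE B (Python) =====
-- def get_fib(x):
--     pos = []
--     a, b = 0, 1
--     for _ in range(x + 1):
--         pos.append(a)
--         a, b = b, a + b
--     neg = [(-1) ** (k + 1) * pos[k] for k in range(x, 0, -1)]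
--     return neg + pos
-- ===== Notes on version B (the rewrite author's own statement) =====
-- stated objective: simpler
-- what changed: A's second subtractive loop that prepends the negative-index Fibonacci numbers one by one is replaced by a single additive recurrence building the nonnegative block plus the alternating-sign reflection identity mapped over that block.
import Mathlib
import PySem

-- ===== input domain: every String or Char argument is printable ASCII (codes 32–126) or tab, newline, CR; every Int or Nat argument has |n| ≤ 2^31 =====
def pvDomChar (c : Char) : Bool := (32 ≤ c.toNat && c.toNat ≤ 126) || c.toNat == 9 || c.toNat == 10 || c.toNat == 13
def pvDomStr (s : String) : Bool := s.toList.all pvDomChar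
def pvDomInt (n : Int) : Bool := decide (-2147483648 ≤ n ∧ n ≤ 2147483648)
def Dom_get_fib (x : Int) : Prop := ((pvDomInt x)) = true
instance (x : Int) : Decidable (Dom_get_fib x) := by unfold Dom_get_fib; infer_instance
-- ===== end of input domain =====

-- B replaces A's second (subtractive, insert-at-front) loop by the closed identity
-- F(-k) = (-1)^(k+1)·F(k) over the already-computed positive block (objective: simpler).

-- ===== PORT A =====
def get_fib (x : Int) : List Int :=
  let s1 := (List.range x.toNat).foldl
    (fun (st : List Int × Int × Int) _ => (st.1 ++ [st.2.1], st.2.2, st.2.1 + st.2.2))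
    ([], 1, 1)
  let s2 := (List.range (x + 1).toNat).foldl
    (fun (st : List Int × Int × Int) _ => (st.2.1 :: st.1, st.2.2, st.2.1 - st.2.2))
    (s1.1, 0, 1)
  s2.1

-- ===== PORT B =====
def get_fib_alt (x : Int) : List Int :=
  let pos := ((List.range (x + 1).toNat).foldl
    (fun (st : List Int × Int × Int) _ => (st.1 ++ [st.2.1], st.2.2, st.2.1 + st.2.2))
    ([], 0, 1)).1
  let neg := (PySem.List.pyRange x 0 (-1)).map
    (fun k => (-1 : Int) ^ (k + 1).toNat * PySem.List.pyGetD pos k 0)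
  neg ++ pos

-- ===== PRECONDITION & SPEC =====
def Spec_get_fib (x : Int) (out : List Int) : Prop := out = get_fib_alt x
instance (x : Int) (out : List Int) : Decidable (Spec_get_fib x out) := by unfold Spec_get_fib; infer_instance

-- ===== CLAIM (what is proved, stated in full; the proofs are below) =====
def Claim_equal_get_fib : Prop := ∀ (x : Int), Dom_get_fib x → Spec_get_fib x (get_fib x)

-- ===== LEMMAS AND PROOFS =====

def fibI : Nat → Int
  | 0 => 0
  | 1 => 1
  | n + 2 => fibI n + fibI (n + 1)

theorem foldA (n : Nat) :
    (List.range n).foldl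
      (fun (st : List Int × Int × Int) _ => (st.1 ++ [st.2.1], st.2.2, st.2.1 + st.2.2))
      ([], 1, 1)
    = ((List.range n).map (fun i => fibI (i + 1)), fibI (n + 1), fibI (n + 2)) := by
  induction n with
  | zero => simp [fibI]
  | succ n ih =>
    simp [List.range_succ, ih, fibI]

theorem foldB (n : Nat) :
    (List.range n).foldl
      (fun (st : List Int × Int × Int) _ => (st.1 ++ [st.2.1], st.2.2, st.2.1 + st.2.2))
      ([], 0, 1)
    = ((List.range n).map fibI, fibI n, fibI (n + 1)) := by
  induction n with
  | zero => simp [fibI]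
  | succ n ih =>
    simp [List.range_succ, ih, fibI]

theorem foldN (n : Nat) (l0 : List Int) :
    (List.range n).foldl
      (fun (st : List Int × Int × Int) _ => (st.2.1 :: st.1, st.2.2, st.2.1 - st.2.2))
      (l0, 0, 1)
    = ((List.range n).reverse.map (fun k => (-1 : Int) ^ (k + 1) * fibI k) ++ l0,
       (-1 : Int) ^ (n + 1) * fibI n, (-1 : Int) ^ n * fibI (n + 1)) := by
  induction n with
  | zero => simp [fibI]
  | succ n ih =>
    simp only [List.range_succ, List.foldl_append, ih, List.foldl_cons, List.foldl_nil,
      List.reverse_append, List.reverse_cons, List.reverse_nil, List.nil_append,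
      List.map_cons, List.cons_append, Prod.mk.injEq]
    refine ⟨trivial, ?_, ?_⟩
    · rw [pow_succ, pow_succ]; ring
    · show (-1 : Int) ^ (n + 1) * fibI n - (-1 : Int) ^ n * fibI (n + 1)
        = (-1 : Int) ^ (n + 1) * fibI (n + 2)
      rw [show fibI (n + 2) = fibI n + fibI (n + 1) from rfl, pow_succ]; ring

theorem neg_block (n : Nat) :
    (List.range (n + 1)).reverse.map (fun k => (-1 : Int) ^ (k + 1) * fibI k)
    = (List.range n).map (fun k : Nat =>
        (-1 : Int) ^ (((n : Int) - (k : Int)) + 1).toNat *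
          PySem.List.pyGetD ((List.range (n + 1)).map fibI) ((n : Int) - (k : Int)) 0)
      ++ [0] := by
  apply List.ext_getElem
  · simp
  · intro i h1 h2
    simp only [List.length_map, List.length_reverse, List.length_range] at h1
    rcases Nat.lt_or_ge i n with hi | hi
    · rw [List.getElem_append_left (by simpa using hi)]
      simp only [List.getElem_map, List.getElem_reverse, List.getElem_range,
        List.length_range]
      have hc : (n : Int) - (i : Nat) = ((n - i : Nat) : Int) := by omega
      rw [hc]
      have ht : (((n - i : Nat) : Int) + 1).toNat = (n - i) + 1 := by omega
      rw [ht, PySem.List.pyGetD_natCast]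
      have hlt : n - i < n + 1 := by omega
      have : n + 1 - 1 - i = n - i := by omega
      rw [this]
      simp [List.getD, hlt]
    · have hin : i = n := by omega
      subst hin
      rw [List.getElem_append_right (by simp)]
      simp [fibI]

theorem main_nat (n : Nat) : get_fib (n : Int) = get_fib_alt (n : Int) := by
  have h1 : ((n : Int)).toNat = n := Int.toNat_natCast n
  have h2 : ((n : Int) + 1).toNat = n + 1 := by omega
  unfold get_fib get_fib_alt
  simp only [h1, h2, foldA, foldB, foldN, PySem.List.pyRange_neg_one]
  have h3 : ((n : Int) - 0).toNat = n := by omega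
  rw [h3, List.map_map]
  simp only [Function.comp_def]
  rw [neg_block n]
  have h4 : (List.range (n + 1)).map fibI
      = 0 :: (List.range n).map (fun i => fibI (i + 1)) := by
    simp [List.range_succ_eq_map, List.map_map, fibI, Function.comp_def,
      Nat.succ_eq_add_one]
  rw [h4]
  simp

theorem main_neg (x : Int) (hx : x < 0) : get_fib x = get_fib_alt x := by
  have h1 : x.toNat = 0 := by omega
  have h2 : (x + 1).toNat = 0 := by omega
  have h3 : (x - 0).toNat = 0 := by omega
  unfold get_fib get_fib_alt
  simp [h1, h2, PySem.List.pyRange_neg_one]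

-- ===== VERDICT (by name: the statement is the Claim_ definition above) =====
theorem get_fib_spec : Claim_equal_get_fib := by
  intro x _
  unfold Spec_get_fib
  rcases Int.lt_or_le x 0 with hx | hx
  · exact main_neg x hx
  · obtain ⟨n, rfl⟩ := Int.eq_ofNat_of_zero_le hx
    exact main_nat n
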